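-- pv_equiv track=rewrite | github.com/Marufenko/6.00.1x-class-problems | Counting and Grouping.py | item_order
-- ===== SOURCE A (Python) =====
-- def item_order(order):
-- 	'''
-- 	The function returns a string that counts the number of each item and consolidates
-- 	them in the following order: salad:[# salad] hamburger:[# hambruger] water:[# water]
-- 	'''
-- 	import sys
--
-- 	salad_count = 0
-- 	hamburger_count = 0
-- 	water_count = 0
--
-- 	words = order.split()
--
-- 	for word in words:
-- 		if word == 'salad':
-- 			salad_count += 1
-- 		if word == 'hamburger':
-- 			hamburger_count += 1
-- 		if word == 'water':
-- 			water_count += 1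
--
-- 	return('salad:' + str(salad_count) + ' hamburger:' + str(hamburger_count) + ' water:' + str(water_count))
-- ===== SOURCE B (Python) =====
-- def item_order(order):
--     words = sorted(order.split())
--     counts = {}
--     i = 0
--     n = len(words)
--     while i < n:
--         j = i + 1
--         while j < n and words[j] == words[i]:
--             j += 1
--         counts[words[i]] = j - i
--         i = j
--     return ('salad:' + str(counts.get('salad', 0))
--             + ' hamburger:' + str(counts.get('hamburger', 0))
--             + ' water:' + str(counts.get('water', 0)))
-- ===== Notes on version B (the rewrite author's own statement) =====
-- stated objective: alternative
-- what changed: Replaces A's single pass with three counters by sorting the word list, one run-length grouping scan over the sorted list building a tally dict of every word, and three dict lookups.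
import Mathlib
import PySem

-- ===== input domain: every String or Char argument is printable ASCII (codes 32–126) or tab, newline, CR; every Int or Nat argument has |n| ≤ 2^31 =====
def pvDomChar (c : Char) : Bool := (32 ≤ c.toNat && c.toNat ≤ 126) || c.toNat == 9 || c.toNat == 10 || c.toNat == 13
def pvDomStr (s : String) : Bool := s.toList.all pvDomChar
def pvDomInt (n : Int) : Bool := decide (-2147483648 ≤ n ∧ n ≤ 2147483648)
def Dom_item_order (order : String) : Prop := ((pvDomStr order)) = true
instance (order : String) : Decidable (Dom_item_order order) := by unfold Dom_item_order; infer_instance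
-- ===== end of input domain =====

-- B replaces A's single three-counter pass by sort + one run-length grouping scan into a tally dict + three lookups (alternative algorithm, not faster).

-- ===== PORT A =====
-- single pass over the words, three counters updated by three independent ifs
def item_order (order : String) : String :=
  let words := PySem.Str.split₀ order
  let counts : Int × Int × Int := words.foldl
    (fun (st : Int × Int × Int) word =>
      let st := if word == "salad" then (st.1 + 1, st.2.1, st.2.2) else st
      let st := if word == "hamburger" then (st.1, st.2.1 + 1, st.2.2) else st
      let st := if word == "water" then (st.1, st.2.1, st.2.2 + 1) else st
      st) (0, 0, 0)
  "salad:" ++ PySem.Int.toStr counts.1 ++ " hamburger:" ++ PySem.Int.toStr counts.2.1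
    ++ " water:" ++ PySem.Int.toStr counts.2.2

-- ===== PORT B =====
-- B's while loop over the sorted list: each step consumes one maximal run of equal
-- words (Source B's inner 'while words[j] == words[i]' advance = takeWhile/dropWhile on
-- the remaining suffix) and records its length in the dict.
def pvGroupLoop : List String → PySem.Dict String Int → PySem.Dict String Int
  | [], d => d
  | h :: t, d =>
      pvGroupLoop (t.dropWhile (· == h)) (d.insert h (1 + (t.takeWhile (· == h)).length))
  termination_by l _ => l.length
  decreasing_by
    simp only [List.length_cons]
    exact Nat.lt_succ_of_le (List.length_dropWhile_le _ _)

-- sort the words, group equal runs into a tally dict, look up the three keys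
def item_order_alt (order : String) : String :=
  let words := PySem.List.sorted (PySem.Str.split₀ order) (fun x => x) false
  let counts := pvGroupLoop words PySem.Dict.empty
  "salad:" ++ PySem.Int.toStr (counts.getD "salad" 0)
    ++ " hamburger:" ++ PySem.Int.toStr (counts.getD "hamburger" 0)
    ++ " water:" ++ PySem.Int.toStr (counts.getD "water" 0)

-- ===== PRECONDITION & SPEC =====
def Spec_item_order (order : String) (out : String) : Prop := out = item_order_alt order
instance (order : String) (out : String) : Decidable (Spec_item_order order out) := by unfold Spec_item_order; infer_instance

-- ===== CLAIM (what is proved, stated in full; the proofs are below) =====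
def Claim_equal_item_order : Prop := ∀ (order : String), Dom_item_order order → Spec_item_order order (item_order order)

-- ===== LEMMAS AND PROOFS =====

-- A's loop invariant: the fold adds the three word counts to the starting state.
theorem item_order_fold (l : List String) (a b c : Int) :
    l.foldl
      (fun (st : Int × Int × Int) word =>
        let st := if word == "salad" then (st.1 + 1, st.2.1, st.2.2) else st
        let st := if word == "hamburger" then (st.1, st.2.1 + 1, st.2.2) else st
        let st := if word == "water" then (st.1, st.2.1, st.2.2 + 1) else st
        st) (a, b, c)
    = (a + l.count "salad", b + l.count "hamburger", c + l.count "water") := by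
  induction l generalizing a b c with
  | nil => simp
  | cons x xs ih =>
    simp only [List.foldl_cons, List.count_cons]
    by_cases h1 : x = "salad" <;> by_cases h2 : x = "hamburger" <;> by_cases h3 : x = "water" <;>
      simp_all [Prod.ext_iff] <;> omega

-- B's grouping invariant: on a (≤)-sorted list, pvGroupLoop records each word's count.
theorem pvGroupLoop_getD (l : List String) (hs : l.Pairwise (· ≤ ·)) :
    ∀ (d : PySem.Dict String Int) (k : String),
      (pvGroupLoop l d).getD k 0 = if k ∈ l then (l.count k : Int) else d.getD k 0 := by
  induction hn : l.length using Nat.strong_induction_on generalizing l hs with 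
  | _ n ihn =>
  cases l with
  | nil => intro d k; simp [pvGroupLoop]
  | cons h t =>
    intro d k
    have hrun : ∀ x ∈ t.takeWhile (· == h), x = h := by
      intro x hx
      have := List.mem_takeWhile_imp hx
      simpa using this
    have hnot : h ∉ t.dropWhile (· == h) := by
      intro hmem
      cases hd : t.dropWhile (· == h) with
      | nil => simp [hd] at hmem
      | cons r rs =>
        have hr : ¬ (r = h) := by
          have := List.head?_dropWhile_not (· == h) t
          rw [hd] at this
          simpa using this
        have hsub : (r :: rs).Sublist t := hd ▸ List.dropWhile_sublist _
        have hp : (r :: rs).Pairwise (· ≤ ·) := ((List.pairwise_cons.mp hs).2.sublist hsub : _)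
        have hhr : h ≤ r := by
          have hrt : r ∈ t := hsub.subset (by simp)
          exact List.rel_of_pairwise_cons hs hrt
        rw [hd] at hmem
        rcases List.mem_cons.mp hmem with h1 | h1
        · exact hr h1.symm
        · have : r ≤ h := List.rel_of_pairwise_cons hp h1
          exact hr (le_antisymm this hhr)
    have hsrest : (t.dropWhile (· == h)).Pairwise (· ≤ ·) :=
      (List.pairwise_cons.mp hs).2.sublist (List.dropWhile_sublist _)
    have hsplit : t = t.takeWhile (· == h) ++ t.dropWhile (· == h) :=
      (List.takeWhile_append_dropWhile).symm
    have ih0 := ihn (t.dropWhile (· == h)).length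
      (by subst hn; simp only [List.length_cons]
          exact Nat.lt_succ_of_le (List.length_dropWhile_le _ _))
      (t.dropWhile (· == h)) hsrest rfl
    rw [pvGroupLoop, ih0]
    clear ihn
    by_cases hk : k = h
    · subst hk
      have hck : (k :: t).count k = 1 + (t.takeWhile (· == k)).length := by
        rw [List.count_cons_self]
        have h1 : t.count k = (t.takeWhile (· == k)).count k + (t.dropWhile (· == k)).count k := by
          conv_lhs => rw [hsplit]
          exact List.count_append ..
        have h2 : (t.takeWhile (· == k)).count k = (t.takeWhile (· == k)).length :=
          List.count_eq_length.mpr (fun x hx => by simpa using (hrun x hx).symm)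
        have h3 : (t.dropWhile (· == k)).count k = 0 := List.count_eq_zero.mpr hnot
        omega
      rw [if_neg hnot, if_pos (List.mem_cons_self)]
      rw [hck]
      simp [PySem.Dict.getD, PySem.Dict.get?_insert_self]
    · have hmem_iff : k ∈ t.dropWhile (· == h) ↔ k ∈ h :: t := by
        constructor
        · intro hm; exact List.mem_cons_of_mem _ ((List.dropWhile_sublist _).subset hm)
        · intro hm
          rcases List.mem_cons.mp hm with h1 | h1
          · exact absurd h1 hk
          · rw [hsplit] at h1
            rcases List.mem_append.mp h1 with h2 | h2
            · exact absurd (hrun k h2) hk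
            · exact h2
      have hcount : (t.dropWhile (· == h)).count k = (h :: t).count k := by
        have hc2 : (h :: t).count k = t.count k := by
          simp [Ne.symm hk]
        rw [hc2]
        conv_rhs => rw [hsplit]
        rw [List.count_append]
        have : (t.takeWhile (· == h)).count k = 0 :=
          List.count_eq_zero.mpr (fun hm => hk (hrun k hm))
        omega
      have hins : (d.insert h (1 + ((t.takeWhile (· == h)).length : Int))).getD k 0 = d.getD k 0 := by
        simp [PySem.Dict.getD, PySem.Dict.get?_insert_of_ne _ _ hk]
      by_cases hm : k ∈ t.dropWhile (· == h)
      · rw [if_pos hm, if_pos (hmem_iff.mp hm), hcount]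
      · rw [if_neg hm, if_neg (fun hc => hm (hmem_iff.mpr hc)), hins]

-- ===== VERDICT (by name: the statement is the Claim_ definition above) =====
theorem item_order_spec : Claim_equal_item_order := by
  intro order _
  unfold Spec_item_order item_order item_order_alt
  simp only [item_order_fold]
  have hperm := PySem.List.sorted_perm (PySem.Str.split₀ order) (fun x => x) false
  have hpw : (PySem.List.sorted (PySem.Str.split₀ order) (fun x => x) false).Pairwise (· ≤ ·) := by
    simpa using PySem.List.sorted_pairwise (PySem.Str.split₀ order) (fun x => x)
  have key : ∀ k : String,
      (pvGroupLoop (PySem.List.sorted (PySem.Str.split₀ order) (fun x => x) false)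
        PySem.Dict.empty).getD k 0 = ((PySem.Str.split₀ order).count k : Int) := by
    intro k
    rw [pvGroupLoop_getD _ hpw, hperm.count_eq]
    split_ifs with hm
    · rfl
    · have : (PySem.Str.split₀ order).count k = 0 :=
        List.count_eq_zero.mpr (fun hc => hm (hperm.mem_iff.mpr hc))
      simp [this, PySem.Dict.getD, PySem.Dict.empty, PySem.Dict.get?]
  simp only [key, zero_add]
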